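-- pv_equiv track=rewrite | github.com/Darilbii/BirdSongToolbox | BirdSongToolbox/Epoch_Analysis_Tools.py | make_channel_dict
-- ===== SOURCE A (Python) =====
-- def make_channel_dict(ordered_index):
--     """Creates a Dictionary of the the indexes for each Channel's features in the ordered_index
--
--     Parameters:
--     -----------
--     ordered_index: list
--         Index of Features for Feature Dropping
--                             [list] -> (Tuple)
--         Power:   [Num of Features] -> (Chan Num , Freq Num)
--         Pearson: [Num of Features] -> (Chan Num , Freq Num, Temp Num)
--
--     Returns:
--     -------
--     channel_dict: dict
--         dictionary to be used to remove all features for a single channel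
--         {Channel: [list of Indexes]}
--
--     """
--
--     channel_dict = {}
--     nun_channels = ordered_index[-1][0]+1  # Determine the Number of Channels (Assumes the ordered_index is in order)
--
--     # Iterate over the number of channels
--     for chan_focus in range(nun_channels):
--         value = []
--
--         # Iterate over the total number of features
--         for index in range(len(ordered_index)):
--             if ordered_index[index][0]==chan_focus:
--                 value.append(index)
--         channel_dict[chan_focus] = value # Store the list of that Channel's Features to its corresponding Key in the Dict
--
--     return channel_dict
-- ===== SOURCE B (Python) =====
-- def make_channel_dict(ordered_index):
--     # Pre-initialise every channel 0..max with an empty list,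
--     # then distribute each feature index to its channel in one pass.
--     channel_dict = {chan: [] for chan in range(ordered_index[-1][0] + 1)}
--     for i, row in enumerate(ordered_index):
--         chan = row[0]
--         if chan in channel_dict:
--             channel_dict[chan].append(i)
--     return channel_dict
-- ===== Notes on version B (the rewrite author's own statement) =====
-- stated objective: alternative
-- what changed: B pre-initialises the dict with an empty list per channel 0..max and distributes each feature index to its channel in one pass over ordered_index, instead of A's full rescan of all feature indexes for every channel.
-- outside the precondition, e.g. on make_channel_dict([(), (-1,)]): A returns {}, B raises IndexError
import Mathlib
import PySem

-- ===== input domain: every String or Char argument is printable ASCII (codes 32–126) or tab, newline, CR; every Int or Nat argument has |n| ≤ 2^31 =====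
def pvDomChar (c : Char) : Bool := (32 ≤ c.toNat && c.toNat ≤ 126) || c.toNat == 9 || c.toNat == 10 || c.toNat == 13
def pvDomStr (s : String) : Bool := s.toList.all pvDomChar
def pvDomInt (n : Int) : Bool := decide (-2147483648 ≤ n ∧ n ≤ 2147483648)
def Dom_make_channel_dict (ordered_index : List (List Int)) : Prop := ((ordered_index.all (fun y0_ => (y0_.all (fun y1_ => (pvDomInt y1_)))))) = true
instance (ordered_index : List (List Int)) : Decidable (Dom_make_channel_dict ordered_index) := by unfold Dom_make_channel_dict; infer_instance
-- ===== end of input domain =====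

-- B replaces A's per-channel rescan of all feature indexes by one grouping pass over the
-- features into a dict pre-initialised with channels 0..max (a different algorithm, same result).

-- ===== PORT A =====
-- A: nun_channels = ordered_index[-1][0]+1; for each chan in range(nun_channels) scan ALL
-- feature indexes, collect the matching ones, and store the list under that channel.

def make_channel_dict (ordered_index : List (List Int)) : List (Int × List Int) :=
  let nun_channels : Int :=
    PySem.List.pyGetD (PySem.List.pyGetD ordered_index (-1) []) 0 0 + 1
  let channel_dict : PySem.Dict Int (List Int) :=
    (PySem.List.pyRange 0 nun_channels 1).foldl
      (fun channel_dict chan_focus =>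
        let value : List Int :=
          (PySem.List.pyRange 0 (ordered_index.length : Int) 1).foldl
            (fun value index =>
              if PySem.List.pyGetD (PySem.List.pyGetD ordered_index index []) 0 0 = chan_focus
              then value ++ [index] else value) []
        channel_dict.insert chan_focus value)
      PySem.Dict.empty
  channel_dict.items

-- ===== PORT B =====
-- B: dict comprehension {chan: [] for chan in range(max+1)}, then one enumerate pass
-- appending each index i to its channel's list (an index whose channel has no key is dropped).
def make_channel_dict_alt (ordered_index : List (List Int)) : List (Int × List Int) :=
  let n : Int :=
    PySem.List.pyGetD (PySem.List.pyGetD ordered_index (-1) []) 0 0 + 1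
  let channel_dict0 : PySem.Dict Int (List Int) :=
    (PySem.List.pyRange 0 n 1).foldl (fun d chan => d.insert chan []) PySem.Dict.empty
  let channel_dict : PySem.Dict Int (List Int) :=
    (PySem.List.enumerate ordered_index 0).foldl
      (fun d p =>
        let chan := PySem.List.pyGetD p.2 0 0
        if d.contains chan then d.modify chan [] (fun v => v ++ [p.1]) else d) channel_dict0
  channel_dict.items

-- ===== PRECONDITION & SPEC =====
-- Pre_ excludes the empty list and lists containing an empty row: on those A raises IndexError
-- (ordered_index[-1][0] or ordered_index[index][0]), except in the degenerate case where the last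
-- row's channel is negative — there A returns {} without touching the empty rows, while B's single
-- pass reads row[0] of every row and raises.
def Pre_make_channel_dict (ordered_index : List (List Int)) : Prop :=
  ordered_index ≠ [] ∧ ∀ row ∈ ordered_index, row ≠ []
instance (ordered_index : List (List Int)) : Decidable (Pre_make_channel_dict ordered_index) := by
  unfold Pre_make_channel_dict; infer_instance

def pvWitness_make_channel_dict : List (List Int) := [[0, 1], [0, 2], [1, 0]]

def Spec_make_channel_dict (ordered_index : List (List Int)) (out : List (Int × List Int)) : Prop := out = make_channel_dict_alt ordered_index
instance (ordered_index : List (List Int)) (out : List (Int × List Int)) : Decidable (Spec_make_channel_dict ordered_index out) := by unfold Spec_make_channel_dict; infer_instance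

-- ===== CLAIM (what is proved, stated in full; the proofs are below) =====
def Claim_equal_make_channel_dict : Prop := ∀ (ordered_index : List (List Int)), Dom_make_channel_dict ordered_index → Pre_make_channel_dict ordered_index → Spec_make_channel_dict ordered_index (make_channel_dict ordered_index)

-- ===== LEMMAS AND PROOFS =====
theorem set_update_self (s : PySem.Set Int) (xs : List Int) (h : ∀ x ∈ xs, x ∈ s) :
    PySem.Set.update s xs = s := by
  induction xs generalizing s with
  | nil => rfl
  | cons x t ih =>
    have hx : PySem.Set.add s x = s := by
      simp [PySem.Set.add, PySem.Set.contains, h x (by simp)]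
    show PySem.Set.update (PySem.Set.add s x) t = s
    rw [hx]; exact ih s (fun y hy => h y (by simp [hy]))

theorem guard_fold (l : List (Int × List Int)) (d : PySem.Dict Int (List Int)) :
    l.foldl
      (fun d p =>
        let chan := PySem.List.pyGetD p.2 0 0
        if d.contains chan then d.modify chan [] (fun v => v ++ [p.1]) else d) d
    = (l.filter (fun p => d.contains (PySem.List.pyGetD p.2 0 0))).foldl
        (fun d p => d.modify (PySem.List.pyGetD p.2 0 0) [] (fun v => v ++ [p.1])) d := by
  induction l generalizing d with
  | nil => rfl
  | cons p t ih =>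
    simp only [List.foldl_cons, List.filter_cons]
    by_cases h : d.contains (PySem.List.pyGetD p.2 0 0) = true
    · simp only [h, if_true]
      rw [ih]
      simp only [List.foldl_cons]
      congr 1
      refine List.filter_congr (fun q _ => ?_)
      rw [PySem.Dict.contains_modify]
      by_cases hq : PySem.List.pyGetD q.2 0 0 = PySem.List.pyGetD p.2 0 0
      · simp [hq, h]
      · simp [hq]
    · simp only [Bool.not_eq_true] at h
      simp only [h, if_false, Bool.false_eq_true]
      exact ih d

theorem ports_agree (oi : List (List Int)) :
    make_channel_dict oi = make_channel_dict_alt oi := by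
  unfold make_channel_dict make_channel_dict_alt
  simp only []
  rw [guard_fold]
  set n : Int := PySem.List.pyGetD (PySem.List.pyGetD oi (-1) []) 0 0 + 1 with hn
  set r : List Int := PySem.List.pyRange 0 n 1 with hr
  set m : List Int := PySem.List.pyRange 0 (oi.length : Int) 1 with hm
  -- A's dict: fresh distinct keys, so its items are the range with the per-channel scans
  have hA : (r.foldl
      (fun channel_dict chan_focus =>
        channel_dict.insert chan_focus
          (m.foldl (fun value index =>
            if PySem.List.pyGetD (PySem.List.pyGetD oi index []) 0 0 = chan_focus
            then value ++ [index] else value) []))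
      PySem.Dict.empty).items
      = r.map (fun c => (c,
          m.foldl (fun value index =>
            if PySem.List.pyGetD (PySem.List.pyGetD oi index []) 0 0 = c
            then value ++ [index] else value) [])) := by
    have := PySem.Dict.items_foldl_insert_fresh r (fun c => c)
      (fun c => m.foldl (fun value index =>
            if PySem.List.pyGetD (PySem.List.pyGetD oi index []) 0 0 = c
            then value ++ [index] else value) []) PySem.Dict.empty
      (by intro a _; exact PySem.Dict.contains_empty a)
      (by simpa using PySem.List.nodup_pyRange_one 0 n)
    simpa using this
  rw [hA]
  -- B's initial dict
  have hd0 : (r.foldl (fun d chan => d.insert chan []) PySem.Dict.empty).items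
      = r.map (fun c => (c, ([] : List Int))) := by
    have := PySem.Dict.items_foldl_insert_fresh r (fun c => c)
      (fun _ => ([] : List Int)) PySem.Dict.empty
      (by intro a _; exact PySem.Dict.contains_empty a)
      (by simpa using PySem.List.nodup_pyRange_one 0 n)
    simpa using this
  set D0 : PySem.Dict Int (List Int) := r.foldl (fun d chan => d.insert chan []) PySem.Dict.empty with hD0
  have hkeys0 : D0.keys = r := by
    simp [PySem.Dict.keys, hd0, List.map_map, Function.comp_def]
  have hcont : ∀ x, (D0.contains x = true) ↔ x ∈ r := by
    intro x; rw [PySem.Dict.contains_iff_mem_keys, hkeys0]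
  set L : List (Int × List Int) :=
    (PySem.List.enumerate oi 0).filter (fun p => D0.contains (PySem.List.pyGetD p.2 0 0)) with hL
  set Df : PySem.Dict Int (List Int) :=
    L.foldl (fun d p => d.modify (PySem.List.pyGetD p.2 0 0) [] (fun v => v ++ [p.1])) D0 with hDf
  have hkeysF : Df.keys = r := by
    rw [hDf, PySem.Dict.keys_foldl_modify_key L (fun p => PySem.List.pyGetD p.2 0 0) []
      (fun _ p v => v ++ [p.1]) D0, hkeys0]
    refine set_update_self r _ ?_
    intro x hx
    simp only [List.mem_map] at hx
    obtain ⟨p, hp, rfl⟩ := hx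
    rw [hL] at hp
    exact (hcont _).1 ((List.mem_filter.1 hp).2)
  have hnodupF : Df.keys.Nodup := by rw [hkeysF]; exact PySem.List.nodup_pyRange_one 0 n
  have hitemsF : Df.items = r.map (fun c => (c, Df.getD c [])) := by
    rw [PySem.Dict.items_eq_map_keys Df hnodupF [], hkeysF]
  rw [hitemsF]
  refine List.map_congr_left (fun c hc => ?_)
  refine Prod.ext rfl ?_
  -- value of channel c
  have hgetD0 : D0.getD c [] = [] := by
    refine PySem.Dict.getD_of_mem_items D0 ?_ (by rw [hkeys0]; exact PySem.List.nodup_pyRange_one 0 n) []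
    rw [hd0]
    exact List.mem_map.2 ⟨c, hc, rfl⟩
  have hfold : Df.getD c []
      = D0.getD c [] ++ ((L.map (fun p => (PySem.List.pyGetD p.2 0 0, p.1))).filter
          (fun q => q.1 == c)).map (fun q => q.2) := by
    have h := PySem.Dict.getD_foldl_modify_append
      (L.map (fun p => (PySem.List.pyGetD p.2 0 0, p.1))) D0 c
    simp only [List.foldl_map] at h
    rw [hDf]
    exact h
  rw [hfold, hgetD0, List.nil_append]
  rw [List.filter_map, List.map_map]
  -- drop the contains-guard from the filter: c is a key
  rw [hL, List.filter_filter]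
  have hpred : ∀ p ∈ PySem.List.enumerate oi 0,
      ((((fun q : Int × Int => q.1 == c) ∘ fun p : Int × List Int =>
          (PySem.List.pyGetD p.2 0 0, p.1)) p) && D0.contains (PySem.List.pyGetD p.2 0 0))
      = (PySem.List.pyGetD p.2 0 0 == c) := by
    intro p _
    by_cases hq : PySem.List.pyGetD p.2 0 0 = c
    · simp [hq, (hcont c).2 hc]
    · simp [hq]
  rw [List.filter_congr hpred]
  -- enumerate as a map over the index range
  rw [PySem.List.enumerate_eq_map_pyRange oi []]
  rw [List.filter_map, List.map_map]
  simp only [PySem.List.len_eq, Function.comp_def]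
  rw [PySem.List.foldl_append_ite_eq_filter
    (fun index => PySem.List.pyGetD (PySem.List.pyGetD oi index []) 0 0 = c) m []]
  simp only [List.nil_append, hm, List.map_id']
  exact List.filter_congr (fun j _ => rfl)

-- ===== VERDICT (by name: the statement is the Claim_ definition above) =====
theorem make_channel_dict_spec : Claim_equal_make_channel_dict := by
  intro ordered_index _ _
  unfold Spec_make_channel_dict
  exact ports_agree ordered_index
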